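-- pv_equiv track=rewrite | github.com/SenSnahasis/Feature_Extraction_Algorithms | Feature_Extraction.py | encodeDistances
-- ===== SOURCE A (Python) =====
-- amino_acids = ['A', 'C', 'D', 'E', 'F', 'G', 'H', 'I', 'K',
--                'L', 'M', 'N', 'P', 'Q', 'R', 'S', 'T', 'V', 'W', 'Y']
--
-- def encodeDistances(sequence):
--     encoded_distances = {}
--
--     for amino in amino_acids:
--         encoded_distances[f'{amino}'] = []
--
--     for index, amino in enumerate(sequence):
--         # dict[amino] =
--         #               0th index of list = prev occurance of the amino
--         #               from 1st index -> store index - dict[amino][0]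
--         if len(encoded_distances[f'{amino}']) == 0:
--             encoded_distances[f'{amino}'].append(index+1)
--         else:
--             prev_distance = encoded_distances[f'{amino}'][0] - 1
--             encoded_distances[f'{amino}'].append(index - prev_distance)
--
--     for amino in amino_acids:
--         if len(encoded_distances[f'{amino}']) > 1:
--             encoded_distances[f'{amino}'].pop(0)
--
--     return encoded_distances
-- ===== SOURCE B (Python) =====
-- amino_acids = ['A', 'C', 'D', 'E', 'F', 'G', 'H', 'I', 'K',
--                'L', 'M', 'N', 'P', 'Q', 'R', 'S', 'T', 'V', 'W', 'Y']
--
-- def encodeDistances(sequence):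
--     # Pass 1: collect 0-based occurrence indices per amino acid.
--     positions = {a: [] for a in amino_acids}
--     for i, ch in enumerate(sequence):
--         positions[ch].append(i)
--     # Pass 2: encode each index list independently.
--     out = {}
--     for a in amino_acids:
--         idxs = positions[a]
--         if not idxs:
--             out[a] = []
--         elif len(idxs) == 1:
--             out[a] = [idxs[0] + 1]
--         else:
--             out[a] = [j - idxs[0] for j in idxs[1:]]
--     return out
-- ===== Notes on version B (the rewrite author's own statement) =====
-- stated objective: alternative
-- what changed: B replaces A's interleaved running-state dict loop plus a pop(0) fix-up pass by two independent passes: one pass collecting the 0-based occurrence indices of each amino acid, then a direct per-amino encoding ([] / [i0+1] / gaps from the first index) built in amino_acids order.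
import Mathlib
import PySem

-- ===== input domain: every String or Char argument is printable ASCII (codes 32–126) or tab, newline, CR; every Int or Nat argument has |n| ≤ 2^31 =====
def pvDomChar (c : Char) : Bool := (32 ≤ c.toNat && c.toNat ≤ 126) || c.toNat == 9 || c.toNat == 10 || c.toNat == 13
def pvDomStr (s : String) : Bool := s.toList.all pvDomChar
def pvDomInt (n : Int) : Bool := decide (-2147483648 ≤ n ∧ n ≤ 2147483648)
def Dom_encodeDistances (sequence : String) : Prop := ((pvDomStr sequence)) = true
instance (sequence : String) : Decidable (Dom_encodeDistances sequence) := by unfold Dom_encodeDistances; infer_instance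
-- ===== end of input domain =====

-- B separates index collection from the encoding transform (two independent passes) instead of
-- A's interleaved running-state loop plus a fix-up pass; objective: alternative decomposition.

-- ===== PORT A =====
def pvAminoAcids : List String :=
  ["A", "C", "D", "E", "F", "G", "H", "I", "K",
   "L", "M", "N", "P", "Q", "R", "S", "T", "V", "W", "Y"]

-- for amino in amino_acids: encoded_distances[amino] = []
def pvInitA : PySem.Dict String (List Int) :=
  pvAminoAcids.foldl (fun d a => d.insert a []) PySem.Dict.empty

-- body of "for index, amino in enumerate(sequence)"; the `.append` is getD-then-insert;
-- under Pre_ the key is always present so getD's default is never taken (Python raises KeyError otherwise)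
def pvStepA (d : PySem.Dict String (List Int)) (q : Int × Char) : PySem.Dict String (List Int) :=
  let k := String.ofList [q.2]
  let cur := d.getD k []
  if cur.length = 0 then
    d.insert k (cur ++ [q.1 + 1])
  else
    -- prev_distance = encoded_distances[amino][0] - 1 ; list nonempty in this branch, so [0] = headD
    let prev := cur.headD 0 - 1
    d.insert k (cur ++ [q.1 - prev])

-- for amino in amino_acids: if len(...) > 1: .pop(0)  (pop(0) leaves the tail)
def pvPopA (d : PySem.Dict String (List Int)) : PySem.Dict String (List Int) :=
  pvAminoAcids.foldl
    (fun d a => if (d.getD a []).length > 1 then d.insert a ((d.getD a []).drop 1) else d) d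

def encodeDistances (sequence : String) : List (String × List Int) :=
  (pvPopA ((PySem.List.enumerate sequence.toList).foldl pvStepA pvInitA)).items

-- ===== PORT B =====
-- encoding of one index list (B's if/elif/else)
def pvEnc (idxs : List Int) : List Int :=
  match idxs with
  | [] => []
  | [i0] => [i0 + 1]
  | i0 :: rest => rest.map (fun j => j - i0)

def encodeDistances_alt (sequence : String) : List (String × List Int) :=
  -- positions = {a: [] for a in amino_acids}; for i, ch in enumerate(sequence): positions[ch].append(i)
  let pos0 : PySem.Dict String (List Int) :=
    pvAminoAcids.foldl (fun d a => d.insert a []) PySem.Dict.empty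
  let pos := (PySem.List.enumerate sequence.toList).foldl
    (fun d q => d.modify (String.ofList [q.2]) [] (fun l => l ++ [q.1])) pos0
  -- out = {}; for a in amino_acids: out[a] = <encoded positions[a]>
  (pvAminoAcids.foldl (fun d a => d.insert a (pvEnc (pos.getD a []))) PySem.Dict.empty).items

-- ===== PRECONDITION & SPEC =====
-- the 20 amino-acid characters (used only to state Pre_)
def pvAminoChars : List Char :=
  ['A', 'C', 'D', 'E', 'F', 'G', 'H', 'I', 'K',
   'L', 'M', 'N', 'P', 'Q', 'R', 'S', 'T', 'V', 'W', 'Y']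

-- Pre_ excludes exactly the sequences containing a character outside the 20 amino acids,
-- on which the Python A raises KeyError (B raises there too).
def Pre_encodeDistances (sequence : String) : Prop :=
  sequence.toList.all (fun c => pvAminoChars.contains c) = true
instance (sequence : String) : Decidable (Pre_encodeDistances sequence) := by
  unfold Pre_encodeDistances; infer_instance
def pvWitness_encodeDistances : String := "AC"

def Spec_encodeDistances (sequence : String) (out : List (String × List Int)) : Prop := out = encodeDistances_alt sequence
instance (sequence : String) (out : List (String × List Int)) : Decidable (Spec_encodeDistances sequence out) := by unfold Spec_encodeDistances; infer_instance

-- ===== CLAIM (what is proved, stated in full; the proofs are below) =====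
def Claim_equal_encodeDistances : Prop := ∀ (sequence : String), Dom_encodeDistances sequence → Pre_encodeDistances sequence → Spec_encodeDistances sequence (encodeDistances sequence)

-- ===== LEMMAS AND PROOFS =====

lemma pre_mem (sequence : String) (hpre : Pre_encodeDistances sequence) :
    ∀ c ∈ sequence.toList, String.ofList [c] ∈ pvAminoAcids := by
  have h : ∀ c ∈ sequence.toList, c ∈ pvAminoChars := by
    simpa [Pre_encodeDistances, List.all_eq_true] using hpre
  intro c hc
  have e : pvAminoAcids = pvAminoChars.map (fun a => String.ofList [a]) := by decide
  rw [e, List.mem_map]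
  exact ⟨c, h c hc, rfl⟩

-- occurrence indices (0-based) of the character whose singleton string is k, in enumerate order
def pvPosOf (l : List (Int × Char)) (k : String) : List Int :=
  (l.filter (fun q => String.ofList [q.2] == k)).map (·.1)

-- A's running state at a key after seeing occurrence indices p
def pvStA (p : List Int) : List Int :=
  match p with
  | [] => []
  | i0 :: rest => (i0 + 1) :: rest.map (fun j => j - i0)

lemma pvStA_append (p : List Int) (i : Int) :
    pvStA (p ++ [i]) =
      if (pvStA p).length = 0 then pvStA p ++ [i + 1]
      else pvStA p ++ [i - ((pvStA p).headD 0 - 1)] := by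
  cases p with
  | nil => simp [pvStA]
  | cons i0 rest => simp [pvStA]

lemma foldA_inv (l : List (Int × Char)) :
    ∀ (d : PySem.Dict String (List Int)) (k : String) (p : List Int),
      d.getD k [] = pvStA p →
      (l.foldl pvStepA d).getD k [] = pvStA (p ++ pvPosOf l k) := by
  induction l with
  | nil => intro d k p h; simpa [pvPosOf] using h
  | cons q t ih =>
    intro d k p h
    by_cases hk : String.ofList [q.2] = k
    · have hstep : (pvStepA d q).getD k [] = pvStA (p ++ [q.1]) := by
        rw [pvStA_append]
        simp only [pvStepA, hk, ← h]
        split_ifs with hc <;> simp [PySem.Dict.getD_insert_self]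
      have := ih (pvStepA d q) k (p ++ [q.1]) hstep
      simpa [pvPosOf, List.filter_cons, hk, List.append_assoc] using this
    · have hstep : (pvStepA d q).getD k [] = pvStA p := by
        simp only [pvStepA]
        split_ifs <;> rw [PySem.Dict.getD_insert_of_ne _ _ _ (Ne.symm hk)] <;> exact h
      have := ih (pvStepA d q) k p hstep
      have hne : (String.ofList [q.2] == k) = false := by simpa using hk
      simpa [pvPosOf, List.filter_cons, hne] using this

lemma pvInitA_getD (k : String) (hk : k ∈ pvAminoAcids) : pvInitA.getD k [] = [] := by
  simp only [pvAminoAcids, List.mem_cons, List.not_mem_nil, or_false] at hk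
  rcases hk with rfl|rfl|rfl|rfl|rfl|rfl|rfl|rfl|rfl|rfl|rfl|rfl|rfl|rfl|rfl|rfl|rfl|rfl|rfl|rfl <;> decide

lemma pvInitA_keys : pvInitA.keys = pvAminoAcids := by decide

lemma keys_stepA (d : PySem.Dict String (List Int)) (q : Int × Char)
    (h : String.ofList [q.2] ∈ d.keys) : (pvStepA d q).keys = d.keys := by
  have hc : d.contains (String.ofList [q.2]) = true := (PySem.Dict.contains_iff_mem_keys _ _).mpr h
  simp only [pvStepA]
  split_ifs <;> exact PySem.Dict.keys_insert_of_contains _ _ hc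

lemma keys_foldA (l : List (Int × Char)) :
    ∀ (d : PySem.Dict String (List Int)), (∀ q ∈ l, String.ofList [q.2] ∈ d.keys) →
      (l.foldl pvStepA d).keys = d.keys := by
  induction l with
  | nil => intro d _; rfl
  | cons q t ih =>
    intro d h
    have hq := h q (List.mem_cons_self ..)
    have hs := keys_stepA d q hq
    rw [List.foldl_cons, ih (pvStepA d q) (fun r hr => by rw [hs]; exact h r (List.mem_cons_of_mem _ hr)), hs]

-- the pop(0) adjustment applied to a stored value
def pvPopAdj (v : List Int) : List Int := if v.length > 1 then v.drop 1 else v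

lemma getD_popFold (as : List String) :
    ∀ (d : PySem.Dict String (List Int)) (k : String), as.Nodup →
      (as.foldl
        (fun d a => if (d.getD a []).length > 1 then d.insert a ((d.getD a []).drop 1) else d)
        d).getD k []
      = if k ∈ as then pvPopAdj (d.getD k []) else d.getD k [] := by
  induction as with
  | nil => intro d k _; simp
  | cons a t ih =>
    intro d k hnd
    rw [List.nodup_cons] at hnd
    set step := fun (d : PySem.Dict String (List Int)) (a : String) =>
      if (d.getD a []).length > 1 then d.insert a ((d.getD a []).drop 1) else d with hstepdef
    have hstep : ∀ d' k', (step d' k').getD k [] =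
        if k = k' then pvPopAdj (d'.getD k []) else d'.getD k [] := by
      intro d' k'
      by_cases hk : k = k'
      · subst hk
        rw [if_pos rfl]
        simp only [hstepdef, pvPopAdj]
        split_ifs with h1
        · exact PySem.Dict.getD_insert_self _ _ _ _
        · rfl
      · rw [if_neg hk]
        simp only [hstepdef]
        split_ifs with h1
        · exact PySem.Dict.getD_insert_of_ne _ _ _ hk
        · rfl
    rw [List.foldl_cons, ih (step d a) k hnd.2, hstep d a]
    by_cases hk : k = a
    · subst hk
      simp [hnd.1, pvPopAdj]
    · simp [hk]

lemma keys_popStep (d : PySem.Dict String (List Int)) (a : String) (h : a ∈ d.keys) :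
    ((if (d.getD a []).length > 1 then d.insert a ((d.getD a []).drop 1) else d) : PySem.Dict String (List Int)).keys = d.keys := by
  have hc : d.contains a = true := (PySem.Dict.contains_iff_mem_keys _ _).mpr h
  split_ifs
  · exact PySem.Dict.keys_insert_of_contains _ _ hc
  · rfl

lemma keys_popFold (as : List String) :
    ∀ (d : PySem.Dict String (List Int)), (∀ a ∈ as, a ∈ d.keys) →
      (as.foldl
        (fun d a => if (d.getD a []).length > 1 then d.insert a ((d.getD a []).drop 1) else d)
        d).keys = d.keys := by
  induction as with
  | nil => intro d _; rfl
  | cons a t ih =>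
    intro d h
    have hs := keys_popStep d a (h a (List.mem_cons_self ..))
    rw [List.foldl_cons, ih _ (fun b hb => by rw [hs]; exact h b (List.mem_cons_of_mem _ hb)), hs]

lemma pvPopAdj_stA (p : List Int) : pvPopAdj (pvStA p) = pvEnc p := by
  match p with
  | [] => rfl
  | [i0] => rfl
  | i0 :: x :: xs => simp [pvPopAdj, pvStA, pvEnc]

lemma pvAminoAcids_nodup : pvAminoAcids.Nodup := by decide

-- A's final dict, per key
lemma A_getD (sequence : String) (k : String)
    (hk : k ∈ pvAminoAcids) :
    (pvPopA ((PySem.List.enumerate sequence.toList).foldl pvStepA pvInitA)).getD k []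
      = pvEnc (pvPosOf (PySem.List.enumerate sequence.toList) k) := by
  have hmid : ((PySem.List.enumerate sequence.toList).foldl pvStepA pvInitA).getD k []
      = pvStA (pvPosOf (PySem.List.enumerate sequence.toList) k) := by
    have := foldA_inv (PySem.List.enumerate sequence.toList) pvInitA k []
      (by rw [pvInitA_getD k hk]; rfl)
    simpa using this
  rw [pvPopA, getD_popFold pvAminoAcids _ k pvAminoAcids_nodup, if_pos hk, hmid, pvPopAdj_stA]

lemma enum_mem_keys (sequence : String) (hpre : Pre_encodeDistances sequence)
    (q : Int × Char) (hq : q ∈ PySem.List.enumerate sequence.toList) :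
    String.ofList [q.2] ∈ pvAminoAcids := by
  rcases (PySem.List.mem_enumerate_iff _ _ _).mp hq with ⟨j, hj, rfl⟩
  exact pre_mem sequence hpre _ (List.getElem_mem hj)

lemma A_keys (sequence : String) (hpre : Pre_encodeDistances sequence) :
    (pvPopA ((PySem.List.enumerate sequence.toList).foldl pvStepA pvInitA)).keys = pvAminoAcids := by
  have h1 : ((PySem.List.enumerate sequence.toList).foldl pvStepA pvInitA).keys = pvAminoAcids := by
    rw [keys_foldA _ pvInitA (fun q hq => by
      rw [pvInitA_keys]; exact enum_mem_keys sequence hpre q hq), pvInitA_keys]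
  rw [pvPopA, keys_popFold _ _ (fun a ha => by rw [h1]; exact ha), h1]

-- B's positions dict, per key
lemma B_pos_getD (sequence : String) (k : String) (hk : k ∈ pvAminoAcids) :
    ((PySem.List.enumerate sequence.toList).foldl
        (fun d q => d.modify (String.ofList [q.2]) [] (fun l => l ++ [q.1]))
        (pvAminoAcids.foldl (fun d a => d.insert a []) PySem.Dict.empty)).getD k []
      = pvPosOf (PySem.List.enumerate sequence.toList) k := by
  have hmap : (PySem.List.enumerate sequence.toList).foldl
      (fun d q => d.modify (String.ofList [q.2]) [] (fun l => l ++ [q.1]))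
      (pvAminoAcids.foldl (fun d a => d.insert a []) PySem.Dict.empty)
      = ((PySem.List.enumerate sequence.toList).map (fun q => (String.ofList [q.2], q.1))).foldl
        (fun d p => d.modify p.1 [] (fun l => l ++ [p.2])) pvInitA := by
    rw [List.foldl_map]; rfl
  rw [hmap, PySem.Dict.getD_foldl_modify_append, pvInitA_getD k hk, List.filter_map, List.map_map]
  rfl

theorem encodeDistances_spec_aux (sequence : String) (hpre : Pre_encodeDistances sequence) :
    encodeDistances sequence = encodeDistances_alt sequence := by
  unfold encodeDistances encodeDistances_alt
  have hA : (pvPopA ((PySem.List.enumerate sequence.toList).foldl pvStepA pvInitA)).items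
      = pvAminoAcids.map (fun a => (a, pvEnc (pvPosOf (PySem.List.enumerate sequence.toList) a))) := by
    have hnd : (pvPopA ((PySem.List.enumerate sequence.toList).foldl pvStepA pvInitA)).keys.Nodup := by
      rw [A_keys sequence hpre]; exact pvAminoAcids_nodup
    rw [PySem.Dict.items_eq_map_keys _ hnd ([] : List Int), A_keys sequence hpre]
    exact List.map_congr_left (fun a ha => by rw [A_getD sequence a ha])
  have hB : (pvAminoAcids.foldl
      (fun d a => d.insert a (pvEnc
        (((PySem.List.enumerate sequence.toList).foldl
          (fun d q => d.modify (String.ofList [q.2]) [] (fun l => l ++ [q.1]))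
          (pvAminoAcids.foldl (fun d a => d.insert a []) PySem.Dict.empty)).getD a [])))
      PySem.Dict.empty).items
      = pvAminoAcids.map (fun a => (a, pvEnc (pvPosOf (PySem.List.enumerate sequence.toList) a))) := by
    rw [PySem.Dict.items_foldl_insert_fresh pvAminoAcids (fun a => a) _ PySem.Dict.empty
      (fun a _ => PySem.Dict.contains_empty a) (by simpa using pvAminoAcids_nodup)]
    rw [show (PySem.Dict.empty : PySem.Dict String (List Int)).items = [] from rfl, List.nil_append]
    exact List.map_congr_left (fun a ha => by rw [B_pos_getD sequence a ha])
  rw [hA, hB]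

-- ===== VERDICT (by name: the statement is the Claim_ definition above) =====
theorem encodeDistances_spec : Claim_equal_encodeDistances := by
  intro sequence _ hpre
  unfold Spec_encodeDistances
  exact encodeDistances_spec_aux sequence hpre
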